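-- pv_equiv track=rewrite | github.com/CaseOLAP/caseolap_lift | preprocessing/prepare_knowledge_base_data.py | extract_go_hierarchy
-- ===== SOURCE A (Python) =====
-- def extract_go_hierarchy(go_dict):
--     go_id_to_links = {}
--
--     for go_term, go_fields in go_dict.items():
--
--         parents = []
--         if 'is_a' in go_fields:
--             parents += [p.split(" ! ")[0] for p in go_fields['is_a']]
--         if 'relationship' in go_fields:
--             parents += [p.split(" ! ")[0].strip('part_of ') for p in go_fields['relationship'] if 'part_of' in p]
--
--         # add to dict
--         for g in [go_term] + parents:
--             if g not in go_id_to_links: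
--                 go_id_to_links[g] = dict()
--                 go_id_to_links[g]['parents'] = []
--                 go_id_to_links[g]['children'] = []
--         for p in parents:
--             go_id_to_links[p]['children'] += [go_term]
--             go_id_to_links[go_term]['parents'] += [p]
--     return go_id_to_links
-- ===== SOURCE B (Python) =====
-- def _go_parents(go_fields):
--     parents = []
--     if 'is_a' in go_fields:
--         parents += [p.split(" ! ")[0] for p in go_fields['is_a']]
--     if 'relationship' in go_fields:
--         parents += [p.split(" ! ")[0].strip('part_of ') for p in go_fields['relationship'] if 'part_of' in p]
--     return parents
--
--
-- def extract_go_hierarchy(go_dict):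
--     # pass 1: parse every term's parent list once
--     parsed = [(t, _go_parents(fs)) for t, fs in go_dict.items()]
--     # node order = first sight of each id in the stream t, *parents
--     order = dict.fromkeys(g for t, ps in parsed for g in [t] + ps)
--     # pass 2: accumulate both link maps in one sweep over the parsed records
--     parents_map, children_map = {}, {}
--     for t, ps in parsed:
--         parents_map.setdefault(t, []).extend(ps)
--         for p in ps:
--             children_map.setdefault(p, []).append(t)
--     return {k: {'parents': parents_map.get(k, []),
--                 'children': children_map.get(k, [])} for k in order}
-- ===== Notes on version B (the rewrite author's own statement) =====
-- stated objective: alternative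
-- what changed: A interleaves parsing with incremental node creation and per-edge mutation of one nested dict; B is a parse-then-build pipeline: it first materialises the (term, parents) records, derives the key order by first-occurrence dedup of the id stream, accumulates separate parents/children maps in one sweep, and assembles the result dict in a single comprehension.
import Mathlib
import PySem

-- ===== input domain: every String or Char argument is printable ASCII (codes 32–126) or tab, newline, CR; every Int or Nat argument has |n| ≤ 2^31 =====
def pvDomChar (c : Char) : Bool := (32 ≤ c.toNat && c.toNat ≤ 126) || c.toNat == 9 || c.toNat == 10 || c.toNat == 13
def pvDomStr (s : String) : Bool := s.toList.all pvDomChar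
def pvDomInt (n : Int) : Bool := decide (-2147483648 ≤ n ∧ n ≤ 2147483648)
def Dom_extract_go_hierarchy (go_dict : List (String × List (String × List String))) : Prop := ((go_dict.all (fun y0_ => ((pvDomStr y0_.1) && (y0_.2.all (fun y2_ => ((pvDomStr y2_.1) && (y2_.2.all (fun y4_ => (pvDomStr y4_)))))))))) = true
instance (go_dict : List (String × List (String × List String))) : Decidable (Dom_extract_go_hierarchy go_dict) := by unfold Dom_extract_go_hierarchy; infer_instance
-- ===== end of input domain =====

-- B reorganises A's single mutate-as-you-parse loop into a parse-then-build pipeline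
-- (parsed records, first-occurrence key order, two link maps, one assembling
-- comprehension); same return value, similar cost ('alternative', not claimed faster).

-- ===== PORT A =====
-- Literal transliteration of A: one fold over go_dict; per record it parses the parent
-- ids, creates missing nodes (the three Python lines net-store {'parents': [], 'children': []},
-- inserted here as that literal inner dict), then appends both ends of every edge.
-- dict lookups ('is_a' in go_fields / go_fields[...]) are first-match on the assoc list.
def extract_go_hierarchy (go_dict : List (String × List (String × List String))) : List (String × List (String × List String)) :=
  (go_dict.foldl (fun d r =>
      let go_term := r.1
      let parents : List String :=
        (match r.2.find? (fun kv => kv.1 == "is_a") with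
          | some kv => kv.2.map (fun p => ((PySem.Str.split? p " ! ").getD []).headD "")
          | none => []) ++
        (match r.2.find? (fun kv => kv.1 == "relationship") with
          | some kv => (kv.2.filter (fun p => PySem.Str.isIn "part_of" p)).map
              (fun p => PySem.Str.stripChars (((PySem.Str.split? p " ! ").getD []).headD "") "part_of ")
          | none => [])
      let d := (go_term :: parents).foldl (fun d g =>
          if d.contains g then d
          else d.insert g ((PySem.Dict.empty.insert "parents" ([] : List String)).insert "children" [])) d
      parents.foldl (fun d p =>
          (d.modify p PySem.Dict.empty (fun links => links.modify "children" [] (· ++ [go_term]))).modify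
            go_term PySem.Dict.empty (fun links => links.modify "parents" [] (· ++ [p]))) d)
    PySem.Dict.empty).items.map (fun kv => (kv.1, kv.2.items))

-- ===== PORT B =====
-- B-side helper: _go_parents of Source B (the parse A performs inline).
def goParents (go_fields : List (String × List String)) : List String :=
  (match go_fields.find? (fun kv => kv.1 == "is_a") with
    | some kv => kv.2.map (fun p => ((PySem.Str.split? p " ! ").getD []).headD "")
    | none => []) ++
  (match go_fields.find? (fun kv => kv.1 == "relationship") with
    | some kv => (kv.2.filter (fun p => PySem.Str.isIn "part_of" p)).map
        (fun p => PySem.Str.stripChars (((PySem.Str.split? p " ! ").getD []).headD "") "part_of ")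
    | none => [])

-- Transliteration of Source B: parsed records, first-occurrence order (dict.fromkeys),
-- one sweep filling the two link maps (the Python loop carries both dicts), final comprehension.
def extract_go_hierarchy_alt (go_dict : List (String × List (String × List String))) : List (String × List (String × List String)) :=
  let parsed := go_dict.map (fun r => (r.1, goParents r.2))
  let order := PySem.List.dedup (parsed.flatMap (fun tp => tp.1 :: tp.2))
  let pc := parsed.foldl (fun pc tp =>
      (pc.1.modify tp.1 [] (· ++ tp.2),
       tp.2.foldl (fun c p => c.modify p [] (· ++ [tp.1])) pc.2))
    (PySem.Dict.empty, PySem.Dict.empty)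
  order.map (fun k =>
    (k, [("parents", pc.1.getD k []), ("children", pc.2.getD k [])]))

-- ===== PRECONDITION & SPEC =====
def Spec_extract_go_hierarchy (go_dict : List (String × List (String × List String))) (out : List (String × List (String × List String))) : Prop := out = extract_go_hierarchy_alt go_dict
instance (go_dict : List (String × List (String × List String))) (out : List (String × List (String × List String))) : Decidable (Spec_extract_go_hierarchy go_dict out) := by unfold Spec_extract_go_hierarchy; infer_instance

-- ===== CLAIM (what is proved, stated in full; the proofs are below) =====
def Claim_equal_extract_go_hierarchy : Prop := ∀ (go_dict : List (String × List (String × List String))), Dom_extract_go_hierarchy go_dict → Spec_extract_go_hierarchy go_dict (extract_go_hierarchy go_dict)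

-- ===== LEMMAS AND PROOFS =====

-- A's loop body, split for the proof: node creation, then edge appends, over a parsed record.
def pvNodeStep (d : PySem.Dict String (PySem.Dict String (List String))) (g : String) : PySem.Dict String (PySem.Dict String (List String)) :=
  if d.contains g then d
  else d.insert g ((PySem.Dict.empty.insert "parents" ([] : List String)).insert "children" [])

def pvEdgeStep (t : String) (d : PySem.Dict String (PySem.Dict String (List String))) (p : String) : PySem.Dict String (PySem.Dict String (List String)) :=
  (d.modify p PySem.Dict.empty (fun links => links.modify "children" [] (· ++ [t]))).modify
    t PySem.Dict.empty (fun links => links.modify "parents" [] (· ++ [p]))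

def pvStep (d : PySem.Dict String (PySem.Dict String (List String))) (tp : String × List String) : PySem.Dict String (PySem.Dict String (List String)) :=
  tp.2.foldl (pvEdgeStep tp.1) ((tp.1 :: tp.2).foldl pvNodeStep d)

-- closed forms: a node value, the id stream, key order, parent/child lists of a key
def pvNode (p c : List String) : PySem.Dict String (List String) :=
  PySem.Dict.mk [("parents", p), ("children", c)]
def pvFlat (l : List (String × List String)) : List String := l.flatMap (fun tp => tp.1 :: tp.2)
def pvOrd (l : List (String × List String)) : List String := PySem.List.dedup (pvFlat l)
def pvPm (l : List (String × List String)) (k : String) : List String :=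
  l.flatMap (fun tp => if tp.1 == k then tp.2 else [])
def pvCm (l : List (String × List String)) (k : String) : List String :=
  l.flatMap (fun tp => (tp.2.filter (fun p => p == k)).map (fun _ => tp.1))
def pvItems (ord : List String) (V : String → PySem.Dict String (List String)) : List (String × PySem.Dict String (List String)) :=
  ord.map (fun k => (k, V k))
-- keys from gs that are new w.r.t. ks, in first-occurrence order
def pvNew (ks gs : List String) : List String :=
  match gs with
  | [] => []
  | g :: gs => if g ∈ ks then pvNew ks gs else g :: pvNew (ks ++ [g]) gs

theorem A_eq_fold (go_dict : List (String × List (String × List String))) :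
    extract_go_hierarchy go_dict =
      ((go_dict.map (fun r => (r.1, goParents r.2))).foldl pvStep PySem.Dict.empty).items.map
        (fun kv => (kv.1, kv.2.items)) := by
  unfold extract_go_hierarchy
  rw [List.foldl_map]
  rfl

theorem pvFlat_mem (tp : String × List String) (l : List (String × List String)) (x : String) :
    x ∈ pvFlat (tp :: l) ↔ x = tp.1 ∨ x ∈ tp.2 ∨ x ∈ pvFlat l := by
  simp [pvFlat]

theorem L_new_sub (gs ks : List String) (g : String) (h : g ∈ pvNew ks gs) : g ∉ ks := by
  induction gs generalizing ks with
  | nil => simp [pvNew] at h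
  | cons g' gs ih =>
    by_cases hg : g' ∈ ks
    · exact ih ks (by simpa [pvNew, hg] using h)
    · rcases (by simpa [pvNew, hg] using h : g = g' ∨ g ∈ pvNew (ks ++ [g']) gs) with h1 | h1
      · subst h1; exact hg
      · intro hk; exact ih (ks ++ [g']) h1 (by simp [hk])

theorem L_add (ys ks : List String) : ys.foldl PySem.Set.add ks = ks ++ pvNew ks ys := by
  induction ys generalizing ks with
  | nil => simp [pvNew]
  | cons y ys ih =>
    by_cases h : y ∈ ks
    · simp [List.foldl_cons, PySem.Set.add, h, pvNew, ih]
    · simp [List.foldl_cons, PySem.Set.add, h, pvNew, ih]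

theorem L_Pm_nil (l : List (String × List String)) (g : String) (h : g ∉ pvFlat l) : pvPm l g = [] := by
  induction l with
  | nil => rfl
  | cons tp l ih =>
    have h1 : g ≠ tp.1 := fun he => h ((pvFlat_mem tp l g).mpr (Or.inl he))
    have h3 : g ∉ pvFlat l := fun he => h ((pvFlat_mem tp l g).mpr (Or.inr (Or.inr he)))
    simp only [pvPm, List.flatMap_cons]
    rw [if_neg (by simpa using Ne.symm h1), List.nil_append]
    exact ih h3

theorem L_Cm_nil (l : List (String × List String)) (g : String) (h : g ∉ pvFlat l) : pvCm l g = [] := by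
  induction l with
  | nil => rfl
  | cons tp l ih =>
    have h2 : g ∉ tp.2 := fun he => h ((pvFlat_mem tp l g).mpr (Or.inr (Or.inl he)))
    have h3 : g ∉ pvFlat l := fun he => h ((pvFlat_mem tp l g).mpr (Or.inr (Or.inr he)))
    simp only [pvCm, List.flatMap_cons]
    rw [List.filter_eq_nil_iff.mpr (fun p hp => by
      simp only [beq_iff_eq]
      exact fun he => h2 (he ▸ hp))]
    simp only [List.map_nil, List.nil_append]
    exact ih h3

theorem pvItems_keys (d : PySem.Dict String (PySem.Dict String (List String))) (ord : List String)
    (V : String → PySem.Dict String (List String)) (h : d.items = pvItems ord V) : d.keys = ord := by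
  simp [PySem.Dict.keys, h, pvItems, List.map_map, Function.comp_def]

theorem L_modify (d : PySem.Dict String (PySem.Dict String (List String))) (ord : List String)
    (V : String → PySem.Dict String (List String)) (k : String) (f : PySem.Dict String (List String) → PySem.Dict String (List String))
    (hitems : d.items = pvItems ord V) (hnd : ord.Nodup) (hk : k ∈ ord) :
    (d.modify k PySem.Dict.empty f).items = pvItems ord (fun k' => if k' = k then f (V k) else V k') := by
  have hkeys : d.keys = ord := pvItems_keys d ord V hitems
  have hmem : (k, V k) ∈ d.items := by
    rw [hitems]; exact List.mem_map.mpr ⟨k, hk, rfl⟩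
  have hget : d.getD k PySem.Dict.empty = V k :=
    PySem.Dict.getD_of_mem_items d hmem (hkeys ▸ hnd) _
  have hcont : d.contains k = true := (PySem.Dict.contains_iff_mem_keys d k).mpr (hkeys ▸ hk)
  show (d.insert k (f (d.getD k PySem.Dict.empty))).items = _
  rw [PySem.Dict.items_insert_of_contains d _ hcont, hget, hitems]
  simp only [pvItems, List.map_map]
  refine List.map_congr_left (fun k' _ => ?_)
  by_cases h : k' = k
  · subst h; simp
  · simp [fun hh : k' = k => h hh]

theorem L_node (gs : List String) (d : PySem.Dict String (PySem.Dict String (List String))) :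
    (gs.foldl pvNodeStep d).items = d.items ++ (pvNew d.keys gs).map (fun g => (g, pvNode [] [])) := by
  induction gs generalizing d with
  | nil => simp [pvNew]
  | cons g gs ih =>
    by_cases hc : d.contains g
    · have hm : g ∈ d.keys := (PySem.Dict.contains_iff_mem_keys d g).mp hc
      rw [List.foldl_cons]
      rw [show pvNodeStep d g = d from by simp [pvNodeStep, hc]]
      rw [ih d]
      simp [pvNew, hm]
    · have hm : g ∉ d.keys := fun h => hc ((PySem.Dict.contains_iff_mem_keys d g).mpr h)
      have hc' : d.contains g = false := by simpa using hc
      rw [List.foldl_cons]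
      rw [show pvNodeStep d g = d.insert g ((PySem.Dict.empty.insert "parents" ([] : List String)).insert "children" []) from by simp [pvNodeStep, hc]]
      rw [ih]
      have hki : (d.insert g ((PySem.Dict.empty.insert "parents" ([] : List String)).insert "children" [])).keys = d.keys ++ [g] := by
        simp [PySem.Dict.keys, PySem.Dict.items_insert_of_not_contains d _ hc']
      rw [hki, PySem.Dict.items_insert_of_not_contains d _ hc']
      rw [show pvNew d.keys (g :: gs) = g :: pvNew (d.keys ++ [g]) gs from by simp [pvNew, hm]]
      simp [pvNode]
      rfl

theorem L_edge (t : String) (ord : List String) (hnd : ord.Nodup) (ht : t ∈ ord)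
    (ps : List String) (P C : String → List String) (d : PySem.Dict String (PySem.Dict String (List String)))
    (hitems : d.items = pvItems ord (fun k => pvNode (P k) (C k))) (hps : ∀ p ∈ ps, p ∈ ord) :
    (ps.foldl (pvEdgeStep t) d).items =
      pvItems ord (fun k => pvNode (if k = t then P k ++ ps else P k)
        (C k ++ (ps.filter (fun p => p == k)).map (fun _ => t))) := by
  induction ps generalizing P C d with
  | nil =>
    rw [List.foldl_nil, hitems]
    unfold pvItems
    exact List.map_congr_left (fun k _ => by by_cases h : k = t <;> simp [h])
  | cons p ps ih =>
    rw [List.foldl_cons]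
    have hp : p ∈ ord := hps p (List.mem_cons_self)
    have h1 := L_modify d ord (fun k => pvNode (P k) (C k)) p
      (fun links => links.modify "children" [] (· ++ [t])) hitems hnd hp
    have h1' : (d.modify p PySem.Dict.empty (fun links => links.modify "children" [] (· ++ [t]))).items =
        pvItems ord (fun k => pvNode (P k) (if k = p then C k ++ [t] else C k)) := by
      rw [h1]; unfold pvItems
      refine List.map_congr_left (fun k _ => ?_)
      by_cases h : k = p
      · subst h; simp only [if_true]; rfl
      · simp [h]
    have h2 := L_modify _ ord (fun k => pvNode (P k) (if k = p then C k ++ [t] else C k)) t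
      (fun links => links.modify "parents" [] (· ++ [p])) h1' hnd ht
    have h2' : (pvEdgeStep t d p).items =
        pvItems ord (fun k => pvNode (if k = t then P k ++ [p] else P k) (if k = p then C k ++ [t] else C k)) := by
      unfold pvEdgeStep
      rw [h2]; unfold pvItems
      refine List.map_congr_left (fun k _ => ?_)
      by_cases h : k = t
      · subst h; simp only [if_true]; rfl
      · simp [h]
    rw [ih (fun k => if k = t then P k ++ [p] else P k) (fun k => if k = p then C k ++ [t] else C k)
      _ h2' (fun q hq => hps q (List.mem_cons_of_mem _ hq))]
    unfold pvItems
    refine List.map_congr_left (fun k _ => ?_)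
    by_cases hkp : k = p
    · subst hkp
      by_cases hkt : k = t <;> simp [hkt, List.append_assoc]
    · by_cases hkt : k = t
      · subst hkt
        simp [hkp, Ne.symm hkp]
      · simp [hkt, hkp, Ne.symm hkp]

theorem L_main (l : List (String × List String)) :
    (l.foldl pvStep PySem.Dict.empty).items = pvItems (pvOrd l) (fun k => pvNode (pvPm l k) (pvCm l k)) := by
  induction l using List.reverseRecOn with
  | nil => rfl
  | append_singleton l tp ih =>
    rw [List.foldl_append, List.foldl_cons, List.foldl_nil]
    set d := l.foldl pvStep PySem.Dict.empty with hd
    have hflat : pvFlat (l ++ [tp]) = pvFlat l ++ (tp.1 :: tp.2) := by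
      simp [pvFlat]
    have hord : pvOrd (l ++ [tp]) = pvOrd l ++ pvNew (pvOrd l) (tp.1 :: tp.2) := by
      show PySem.List.dedup (pvFlat (l ++ [tp])) = _
      rw [hflat]
      show (pvFlat l ++ (tp.1 :: tp.2)).foldl PySem.Set.add PySem.Set.empty = _
      rw [List.foldl_append, L_add]
      rfl
    have hkeys : d.keys = pvOrd l := pvItems_keys d (pvOrd l) _ ih
    have hnode : ((tp.1 :: tp.2).foldl pvNodeStep d).items =
        pvItems (pvOrd (l ++ [tp])) (fun k => pvNode (pvPm l k) (pvCm l k)) := by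
      rw [L_node, ih, hord, hkeys]
      unfold pvItems
      rw [List.map_append]
      congr 1
      refine List.map_congr_left (fun g hg => ?_)
      have hg1 : g ∉ pvOrd l := L_new_sub _ _ _ hg
      have hg2 : g ∉ pvFlat l := fun hin => hg1 (by
        have h := (PySem.Set.mem_ofList (pvFlat l) g).mpr hin
        simp only [pvOrd, PySem.List.dedup]
        exact h)
      simp [L_Pm_nil l g hg2, L_Cm_nil l g hg2]
    have hnd : (pvOrd (l ++ [tp])).Nodup := by
      simp only [pvOrd, PySem.List.dedup]
      exact PySem.Set.nodup_ofList (pvFlat (l ++ [tp]))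
    have hmemflat : ∀ x ∈ tp.1 :: tp.2, x ∈ pvOrd (l ++ [tp]) := by
      intro x hx
      have : x ∈ pvFlat (l ++ [tp]) := by rw [hflat]; exact List.mem_append_right _ hx
      simpa [pvOrd, PySem.List.dedup] using (PySem.Set.mem_ofList (pvFlat (l ++ [tp])) x).mpr this
    have ht : tp.1 ∈ pvOrd (l ++ [tp]) := hmemflat tp.1 List.mem_cons_self
    have hedge := L_edge tp.1 (pvOrd (l ++ [tp])) hnd ht tp.2 (fun k => pvPm l k) (fun k => pvCm l k)
      _ hnode (fun p hp => hmemflat p (List.mem_cons_of_mem _ hp))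
    show (tp.2.foldl (pvEdgeStep tp.1) ((tp.1 :: tp.2).foldl pvNodeStep d)).items = _
    rw [hedge]
    unfold pvItems
    refine List.map_congr_left (fun k _ => ?_)
    have hPm : pvPm (l ++ [tp]) k = pvPm l k ++ (if tp.1 == k then tp.2 else []) := by
      simp [pvPm]
    have hCm : pvCm (l ++ [tp]) k = pvCm l k ++ (tp.2.filter (fun p => p == k)).map (fun _ => tp.1) := by
      simp [pvCm]
    simp only [hPm, hCm]
    by_cases h : k = tp.1
    · subst h; simp
    · have hb : (tp.1 == k) = false := by
        simpa using fun hh : tp.1 = k => h hh.symm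
      simp [h, hb]

theorem L_pair {α β γ : Type} (l : List α) (f : β → α → β) (g : γ → α → γ) (a : β) (b : γ) :
    l.foldl (fun pc x => (f pc.1 x, g pc.2 x)) (a, b) = (l.foldl f a, l.foldl g b) := by
  induction l generalizing a b with
  | nil => rfl
  | cons x l ih => simpa using ih (f a x) (g b x)

theorem L_pc (l : List (String × List String)) :
    l.foldl (fun pc tp =>
        (pc.1.modify tp.1 [] (· ++ tp.2),
         tp.2.foldl (fun c p => c.modify p [] (· ++ [tp.1])) pc.2))
      (PySem.Dict.empty, PySem.Dict.empty) =
    (l.foldl (fun d tp => d.modify tp.1 [] (· ++ tp.2)) PySem.Dict.empty,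
     l.foldl (fun c tp => tp.2.foldl (fun c p => c.modify p [] (· ++ [tp.1])) c) PySem.Dict.empty) :=
  L_pair l (fun d tp => d.modify tp.1 [] (· ++ tp.2))
    (fun c tp => tp.2.foldl (fun c p => c.modify p [] (· ++ [tp.1])) c) PySem.Dict.empty PySem.Dict.empty

theorem L_pmap (l : List (String × List String)) (d : PySem.Dict String (List String)) (k : String) :
    (l.foldl (fun d tp => d.modify tp.1 [] (· ++ tp.2)) d).getD k [] = d.getD k [] ++ pvPm l k := by
  induction l generalizing d with
  | nil => simp [pvPm]
  | cons tp l ih =>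
    rw [List.foldl_cons, ih, PySem.Dict.getD_modify]
    by_cases h : k = tp.1
    · simp [pvPm, h]
    · simp [pvPm, h, Ne.symm h]

theorem L_cmap (l : List (String × List String)) (d : PySem.Dict String (List String)) (k : String) :
    (l.foldl (fun c tp => tp.2.foldl (fun c p => c.modify p [] (· ++ [tp.1])) c) d).getD k [] = d.getD k [] ++ pvCm l k := by
  induction l generalizing d with
  | nil => simp [pvCm]
  | cons tp l ih =>
    rw [List.foldl_cons, ih]
    have h1 : (tp.2.foldl (fun c p => c.modify p [] (· ++ [tp.1])) d).getD k [] =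
        d.getD k [] ++ ((tp.2.map (fun p => (p, tp.1))).filter (fun q => q.1 == k)).map (·.2) := by
      have := PySem.Dict.getD_foldl_modify_append (tp.2.map (fun p => (p, tp.1))) d k
      rw [List.foldl_map] at this
      exact this
    rw [h1]
    simp [pvCm, List.filter_map, List.map_map, Function.comp_def]

-- ===== VERDICT (by name: the statement is the Claim_ definition above) =====
theorem extract_go_hierarchy_spec : Claim_equal_extract_go_hierarchy := by
  intro go_dict _
  unfold Spec_extract_go_hierarchy
  rw [A_eq_fold, L_main]
  simp only [extract_go_hierarchy_alt]
  rw [L_pc]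
  unfold pvItems pvOrd pvFlat
  rw [List.map_map]
  refine List.map_congr_left (fun k _ => ?_)
  simp only [Function.comp_def, L_pmap, L_cmap, PySem.Dict.getD_empty]
  rfl
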